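-- pv_equiv track=rewrite | github.com/mohamedameen-io/AutoDev | src/orchestrator/execute_phase.py | _parse_review_verdict
-- ===== SOURCE A (Python) =====
-- def _parse_review_verdict(text: str) -> tuple[str, list[str]]:
--     if not text:
--         return "NEEDS_CHANGES", ["empty reviewer response"]
--     verdict = "APPROVED"
--     for line in text.splitlines():
--         s = line.strip()
--         if not s:
--             continue
--         upper = s.upper()
--         if "REJECTED" in upper:
--             verdict = "REJECTED"
--         elif "NEEDS_CHANGES" in upper or "NEEDS CHANGES" in upper:
--             verdict = "NEEDS_CHANGES"
--         elif "APPROVED" in upper: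
--             verdict = "APPROVED"
--         else:
--             continue
--         break
--     issues: list[str] = []
--     for line in text.splitlines():
--         s = line.strip()
--         if s.startswith("- ") or s.startswith("* "):
--             issues.append(s[2:].strip())
--     return verdict, issues
-- ===== SOURCE B (Python) =====
-- def _parse_review_verdict(text: str) -> tuple[str, list[str]]:
--     if not text:
--         return "NEEDS_CHANGES", ["empty reviewer response"]
--     verdict = "APPROVED"
--     verdict_found = False
--     issues: list[str] = []
--     for line in text.splitlines():
--         s = line.strip()
--         if not s:
--             continue
--         if not verdict_found:
--             upper = s.upper()
--             if "REJECTED" in upper: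
--                 verdict, verdict_found = "REJECTED", True
--             elif "NEEDS_CHANGES" in upper or "NEEDS CHANGES" in upper:
--                 verdict, verdict_found = "NEEDS_CHANGES", True
--             elif "APPROVED" in upper:
--                 verdict, verdict_found = "APPROVED", True
--         if s.startswith("- ") or s.startswith("* "):
--             issues.append(s[2:].strip())
--     return verdict, issues
-- ===== Notes on version B (the rewrite author's own statement) =====
-- stated objective: simpler
-- what changed: B fuses A's two passes over text.splitlines() into one loop that locks the verdict with a verdict_found flag and collects bullet issues in the same iteration.
import Mathlib
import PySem

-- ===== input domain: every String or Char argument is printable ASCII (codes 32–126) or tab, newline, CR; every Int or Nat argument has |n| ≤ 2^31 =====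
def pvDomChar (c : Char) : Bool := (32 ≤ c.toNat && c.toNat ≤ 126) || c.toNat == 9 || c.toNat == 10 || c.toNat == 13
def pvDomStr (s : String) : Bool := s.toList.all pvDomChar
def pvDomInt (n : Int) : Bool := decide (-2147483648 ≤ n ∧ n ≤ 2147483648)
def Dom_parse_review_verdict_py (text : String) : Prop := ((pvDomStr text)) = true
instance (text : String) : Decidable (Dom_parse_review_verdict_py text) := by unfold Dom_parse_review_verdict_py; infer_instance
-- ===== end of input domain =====

-- B fuses A's two passes over the lines into one loop with a verdict_found flag; objective: simpler (one pass).

-- ===== PORT A =====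
-- A's first loop: scan lines for the first verdict keyword (break on match).
def pvVerdA : List String → String
  | [] => "APPROVED"
  | l :: ls =>
    let s := PySem.Str.strip l
    if s = "" then pvVerdA ls
    else
      let upper := PySem.Str.upper s
      if PySem.Str.isIn "REJECTED" upper then "REJECTED"
      else if PySem.Str.isIn "NEEDS_CHANGES" upper || PySem.Str.isIn "NEEDS CHANGES" upper then "NEEDS_CHANGES"
      else if PySem.Str.isIn "APPROVED" upper then "APPROVED"
      else pvVerdA ls

-- A's second loop: collect the bullet lines.
def pvIssuesA : List String → List String
  | [] => []
  | l :: ls =>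
    let s := PySem.Str.strip l
    if PySem.Str.startswith s "- " || PySem.Str.startswith s "* " then
      PySem.Str.strip (PySem.Str.slice s (some 2) none) :: pvIssuesA ls
    else pvIssuesA ls

def parse_review_verdict_py (text : String) : String × List String :=
  if text = "" then ("NEEDS_CHANGES", ["empty reviewer response"])
  else (pvVerdA (PySem.Str.splitlines text), pvIssuesA (PySem.Str.splitlines text))

-- ===== PORT B =====
-- B's single loop: state = (verdict, verdict_found, issues).
def pvLoopB : List String → String → Bool → List String → String × List String
  | [], v, _, issues => (v, issues)
  | l :: ls, v, found, issues =>
    let s := PySem.Str.strip l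
    if s = "" then pvLoopB ls v found issues
    else
      let vf :=
        if found then (v, found)
        else
          let upper := PySem.Str.upper s
          if PySem.Str.isIn "REJECTED" upper then ("REJECTED", true)
          else if PySem.Str.isIn "NEEDS_CHANGES" upper || PySem.Str.isIn "NEEDS CHANGES" upper then ("NEEDS_CHANGES", true)
          else if PySem.Str.isIn "APPROVED" upper then ("APPROVED", true)
          else (v, false)
      let issues' :=
        if PySem.Str.startswith s "- " || PySem.Str.startswith s "* " then
          issues ++ [PySem.Str.strip (PySem.Str.slice s (some 2) none)]
        else issues
      pvLoopB ls vf.1 vf.2 issues'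

def parse_review_verdict_py_alt (text : String) : String × List String :=
  if text = "" then ("NEEDS_CHANGES", ["empty reviewer response"])
  else pvLoopB (PySem.Str.splitlines text) "APPROVED" false []

-- ===== PRECONDITION & SPEC =====
def Spec_parse_review_verdict_py (text : String) (out : String × List String) : Prop := out = parse_review_verdict_py_alt text
instance (text : String) (out : String × List String) : Decidable (Spec_parse_review_verdict_py text out) := by unfold Spec_parse_review_verdict_py; infer_instance

-- ===== CLAIM (what is proved, stated in full; the proofs are below) =====
def Claim_equal_parse_review_verdict_py : Prop := ∀ (text : String), Dom_parse_review_verdict_py text → Spec_parse_review_verdict_py text (parse_review_verdict_py text)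

-- ===== LEMMAS AND PROOFS =====

-- once the verdict is locked, B's loop only collects issues
theorem pvLoopB_found (ls : List String) : ∀ (v : String) (acc : List String),
    pvLoopB ls v true acc = (v, acc ++ pvIssuesA ls) := by
  induction ls with
  | nil => intro v acc; simp [pvLoopB, pvIssuesA]
  | cons l ls ih =>
    intro v acc
    simp only [pvLoopB, pvIssuesA]
    by_cases h : PySem.Str.strip l = ""
    · (simp [h, ih]; decide)
    · simp only [h, ite_false]
      split_ifs with hb <;> simp [ih]

-- before the verdict is locked B carries v = "APPROVED", matching A's first loop
theorem pvLoopB_search (ls : List String) : ∀ (acc : List String),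
    pvLoopB ls "APPROVED" false acc = (pvVerdA ls, acc ++ pvIssuesA ls) := by
  induction ls with
  | nil => intro acc; simp [pvLoopB, pvVerdA, pvIssuesA]
  | cons l ls ih =>
    intro acc
    simp only [pvLoopB, pvVerdA, pvIssuesA]
    by_cases h : PySem.Str.strip l = ""
    · (simp [h, ih]; decide)
    · simp only [h, ite_false]
      split_ifs with h1 h2 h3 hb <;>
        simp_all [pvLoopB_found]

theorem pv_main (text : String) : parse_review_verdict_py text = parse_review_verdict_py_alt text := by
  unfold parse_review_verdict_py parse_review_verdict_py_alt
  by_cases h : text = ""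
  · simp [h]
  · simp [h, pvLoopB_search]

-- ===== VERDICT (by name: the statement is the Claim_ definition above) =====
theorem parse_review_verdict_py_spec : Claim_equal_parse_review_verdict_py := by
  intro text _
  unfold Spec_parse_review_verdict_py
  exact pv_main text
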